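-- pv_equiv track=rewrite | github.com/Hayeong1224/Algorithm | 프로그래머스/3/389481. 봉인된 주문/봉인된 주문.py | solution
-- ===== SOURCE A (Python) =====
-- def alpha_to_num(alpha):
--     result = 0
--     for idx, a in enumerate(alpha[::-1]):
--         result += (ord(a) - ord('a') + 1) * (26 ** idx)
--     return result
--
-- def num_to_alpha(num):
--     result = []
--     while num > 0:
--         num -= 1 # 0~25로 맞추게
--         result.append(chr(ord('a') + (num % 26)))
--         num //= 26
--     return "".join(result[::-1])
--
-- def solution(n, bans):
--     ban_num = sorted([alpha_to_num(b) for b in bans])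
--     for b in ban_num:
--         if b <= n:
--             n += 1
--         else:
--             break
--
--     return num_to_alpha(n)
-- ===== SOURCE B (Python) =====
-- def alpha_to_num(alpha):
--     result = 0
--     for idx, a in enumerate(alpha[::-1]):
--         result += (ord(a) - ord('a') + 1) * (26 ** idx)
--     return result
--
--
-- def num_to_alpha(num):
--     result = []
--     while num > 0:
--         num -= 1
--         result.append(chr(ord('a') + (num % 26)))
--         num //= 26
--     return "".join(result[::-1])
--
--
-- def solution(n, bans):
--     # No sort, no incremental walk: iterate m -> n + #{banned <= m} to its
--     # least fixpoint >= n; that fixpoint is the answer value.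
--     nums = [alpha_to_num(b) for b in bans]
--     m = n
--     while True:
--         c = sum(1 for x in nums if x <= m)
--         if n + c == m:
--             return num_to_alpha(m)
--         m = n + c
-- ===== Notes on version B (the rewrite author's own statement) =====
-- stated objective: alternative
-- what changed: Replaces A's sort-then-incremental-scan (which steps n forward once per banned value it passes) by a sort-free monotone fixpoint iteration: repeatedly set m = n + count(banned <= m) until it stabilises; the least fixpoint >= n is exactly A's final value.
import Mathlib
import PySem

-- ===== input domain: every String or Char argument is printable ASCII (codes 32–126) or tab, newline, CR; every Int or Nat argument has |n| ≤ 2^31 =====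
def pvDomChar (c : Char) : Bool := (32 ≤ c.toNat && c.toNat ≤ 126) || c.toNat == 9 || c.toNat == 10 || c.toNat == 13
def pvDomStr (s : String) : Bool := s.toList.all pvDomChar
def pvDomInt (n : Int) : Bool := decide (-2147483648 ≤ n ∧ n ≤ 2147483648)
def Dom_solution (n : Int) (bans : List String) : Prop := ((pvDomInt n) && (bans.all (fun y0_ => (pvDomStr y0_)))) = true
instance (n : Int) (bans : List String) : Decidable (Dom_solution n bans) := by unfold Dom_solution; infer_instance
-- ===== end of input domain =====

-- B replaces A's sort + incremental forward scan by a sort-free fixpoint iteration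
-- m -> n + #{banned <= m}; same return value (objective: alternative algorithm).


-- ===== PORT A =====
-- shared helper alpha_to_num: fold over enumerate(alpha[::-1])
def alphaToNumGo : List Char → Nat → Int → Int
  | [], _, result => result
  | a :: rest, idx, result =>
      alphaToNumGo rest (idx + 1) (result + ((a.toNat : Int) - 97 + 1) * 26 ^ idx)

def alphaToNum (alpha : String) : Int :=
  alphaToNumGo alpha.toList.reverse 0 0

-- shared helper num_to_alpha: the while-loop; fuel = num.toNat suffices since
-- num strictly decreases towards 0 each iteration ((num-1)//26 < num for num > 0)
def numToAlphaGo : Nat → Int → List Char → List Char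
  | 0, _, result => result
  | fuel + 1, num, result =>
      if 0 < num then
        let num' := num - 1
        numToAlphaGo fuel (PySem.Int.floordiv num' 26)
          (result ++ [Char.ofNat (97 + (PySem.Int.mod num' 26)).toNat])
      else result

def numToAlpha (num : Int) : String :=
  String.ofList (numToAlphaGo num.toNat num []).reverse

-- A's loop: for b in ban_num: if b <= n: n += 1 else: break
def scanA : List Int → Int → Int
  | [], n => n
  | b :: rest, n => if b ≤ n then scanA rest (n + 1) else n

def solution (n : Int) (bans : List String) : String :=
  let ban_num := PySem.List.sorted (bans.map alphaToNum) (fun x => x) false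
  numToAlpha (scanA ban_num n)

-- ===== PORT B =====
-- B's while True loop: m -> n + count(banned <= m) until fixpoint; fuel
-- nums.length + 2 suffices (the count strictly grows each non-final step)
def iterB (n : Int) (nums : List Int) : Nat → Int → Int
  | 0, m => m
  | fuel + 1, m =>
      let c : Int := (nums.countP (fun x => decide (x ≤ m)) : Int)
      if n + c = m then m else iterB n nums fuel (n + c)

def solution_alt (n : Int) (bans : List String) : String :=
  let nums := bans.map alphaToNum
  numToAlpha (iterB n nums (nums.length + 2) n)

-- ===== PRECONDITION & SPEC =====
def Spec_solution (n : Int) (bans : List String) (out : String) : Prop := out = solution_alt n bans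
instance (n : Int) (bans : List String) (out : String) : Decidable (Spec_solution n bans out) := by unfold Spec_solution; infer_instance

-- ===== CLAIM (what is proved, stated in full; the proofs are below) =====
def Claim_equal_solution : Prop := ∀ (n : Int) (bans : List String), Dom_solution n bans → Spec_solution n bans (solution n bans)

-- ===== LEMMAS AND PROOFS =====

theorem le_scanA (bs : List Int) (n : Int) : n ≤ scanA bs n := by
  induction bs generalizing n with
  | nil => simp [scanA]
  | cons b rest ih =>
    simp only [scanA]
    split
    · exact le_trans (by omega) (ih (n + 1))
    · exact le_refl n

-- A's result is a fixpoint of m ↦ n + #{x ∈ bs | x ≤ m} when bs is sorted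
theorem scanA_fix (bs : List Int) (hs : bs.Pairwise (· ≤ ·)) (n : Int) :
    scanA bs n = n + (bs.countP (fun x => decide (x ≤ scanA bs n)) : Int) := by
  induction bs generalizing n with
  | nil => simp [scanA]
  | cons b rest ih =>
    rcases List.pairwise_cons.mp hs with ⟨hb, hrest⟩
    simp only [scanA]
    split
    · rename_i hble
      have hge : n + 1 ≤ scanA rest (n + 1) := le_scanA rest (n + 1)
      have hb' : b ≤ scanA rest (n + 1) := by omega
      have := ih hrest (n + 1)
      simp only [List.countP_cons, hb', decide_true]
      push_cast
      omega
    · rename_i hgt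
      have : ∀ x ∈ b :: rest, ¬ (decide (x ≤ n) = true) := by
        intro x hx
        rcases List.mem_cons.mp hx with rfl | hx
        · simpa using hgt
        · have := hb x hx
          simp only [decide_eq_true_eq]
          omega
      rw [List.countP_eq_zero.mpr this]
      simp
  
-- A's result is the least fixpoint ≥ n
theorem scanA_min (bs : List Int) (hs : bs.Pairwise (· ≤ ·)) (n m' : Int)
    (hge : n ≤ m') (hfix : m' = n + (bs.countP (fun x => decide (x ≤ m')) : Int)) :
    scanA bs n ≤ m' := by
  induction bs generalizing n with
  | nil => simpa [scanA] using hge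
  | cons b rest ih =>
    rcases List.pairwise_cons.mp hs with ⟨hb, hrest⟩
    simp only [scanA]
    split
    · rename_i hble
      have hb' : decide (b ≤ m') = true := by simp only [decide_eq_true_eq]; omega
      simp only [List.countP_cons, hb'] at hfix
      apply ih hrest (n + 1)
      · have hc : (0 : Int) ≤ (rest.countP (fun x => decide (x ≤ m')) : Int) := by positivity
        push_cast at hfix
        omega
      · push_cast at hfix ⊢
        omega
    · exact hge

theorem countP_le_mono (nums : List Int) (m m' : Int) (h : m ≤ m') :
    nums.countP (fun x => decide (x ≤ m)) ≤ nums.countP (fun x => decide (x ≤ m')) := by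
  apply List.countP_mono_left
  intro x _ hx
  simp only [decide_eq_true_eq] at hx ⊢
  omega

-- B's iteration reaches A's fixpoint F, given enough fuel
theorem iterB_eq (n : Int) (nums : List Int) (F : Int)
    (hF : F = n + (nums.countP (fun x => decide (x ≤ F)) : Int))
    (hmin : ∀ m', n ≤ m' → m' = n + (nums.countP (fun x => decide (x ≤ m')) : Int) → F ≤ m') :
    ∀ (fuel : Nat) (m : Int), m ≤ F → m ≤ n + (nums.countP (fun x => decide (x ≤ m)) : Int) →
      nums.countP (fun x => decide (x ≤ F)) + 2 ≤ fuel + nums.countP (fun x => decide (x ≤ m)) →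
      iterB n nums fuel m = F := by
  intro fuel
  induction fuel with
  | zero =>
    intro m hmF _ hfuel
    have := countP_le_mono nums m F hmF
    omega
  | succ fuel ih =>
    intro m hmF hinv hfuel
    simp only [iterB]
    split
    · rename_i hfix
      have hnm : n ≤ m := by
        have : (0:Int) ≤ (nums.countP (fun x => decide (x ≤ m)) : Int) := by positivity
        omega
      have := hmin m hnm hfix.symm
      omega
    · rename_i hne
      set c := nums.countP (fun x => decide (x ≤ m)) with hc
      set m' := n + (c : Int) with hm'
      have hmm' : m < m' := lt_of_le_of_ne hinv (fun h => hne (by omega))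
      have hcF : c ≤ nums.countP (fun x => decide (x ≤ F)) := countP_le_mono nums m F hmF
      have hm'F : m' ≤ F := by rw [hF]; omega
      have hcm' : c ≤ nums.countP (fun x => decide (x ≤ m')) :=
        countP_le_mono nums m m' (le_of_lt hmm')
      by_cases hcase : nums.countP (fun x => decide (x ≤ m')) = c
      · -- m' is itself the fixpoint; one more unfold returns it
        have hfix' : m' = n + (nums.countP (fun x => decide (x ≤ m')) : Int) := by
          rw [hcase]
        have hnm' : n ≤ m' := by
          have : (0:Int) ≤ (c : Int) := by positivity
          omega
        have hFm' : F ≤ m' := hmin m' hnm' hfix'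
        have hm'eq : m' = F := le_antisymm hm'F hFm'
        have hfuel1 : 1 ≤ fuel := by omega
        obtain ⟨fuel', rfl⟩ : ∃ f, fuel = f + 1 := ⟨fuel - 1, by omega⟩
        simp only [iterB, hcase]
        rw [if_pos hm'.symm]
        exact hm'eq
      · have hcgt : c + 1 ≤ nums.countP (fun x => decide (x ≤ m')) := by omega
        exact ih m' hm'F (by omega) (by omega)

theorem scan_eq_iter (n : Int) (nums : List Int) :
    scanA (PySem.List.sorted nums (fun x => x) false) n = iterB n nums (nums.length + 2) n := by
  set bs := PySem.List.sorted nums (fun x => x) false with hbs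
  have hperm : bs.Perm nums := PySem.List.sorted_perm nums (fun x => x) false
  have hs : bs.Pairwise (· ≤ ·) := by
    have := PySem.List.sorted_pairwise nums (fun x => x)
    simpa using this
  have hcnt : ∀ m : Int, bs.countP (fun x => decide (x ≤ m)) = nums.countP (fun x => decide (x ≤ m)) :=
    fun m => hperm.countP_eq _
  set F := scanA bs n with hFdef
  have hF : F = n + (nums.countP (fun x => decide (x ≤ F)) : Int) := by
    rw [← hcnt]; exact scanA_fix bs hs n
  have hmin : ∀ m', n ≤ m' → m' = n + (nums.countP (fun x => decide (x ≤ m')) : Int) → F ≤ m' := by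
    intro m' h1 h2
    exact scanA_min bs hs n m' h1 (by rw [hcnt]; exact h2)
  refine (iterB_eq n nums F hF hmin (nums.length + 2) n (le_scanA bs n) ?_ ?_).symm
  · have : (0:Int) ≤ (nums.countP (fun x => decide (x ≤ n)) : Int) := by positivity
    omega
  · have := List.countP_le_length (l := nums) (p := fun x => decide (x ≤ F))
    omega

-- ===== VERDICT (by name: the statement is the Claim_ definition above) =====
theorem solution_spec : Claim_equal_solution := by
  intro n bans _
  unfold Spec_solution solution solution_alt
  simp only
  rw [scan_eq_iter n (bans.map alphaToNum)]
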